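-- pv_equiv track=rewrite | github.com/dmtAndIvanson/dmtAnd_YandexAlgorithmTraining | t10/Ya3/J/J.py | create_points_2
-- ===== SOURCE A (Python) =====
-- def create_points_2(dict1, coord, d, limit):
--     """Create list of coordinates with maximum sizes d."""
--     x, y = coord
--     dict2 = {}
--
--     for i in dict1:
--         sx, sy = i
--         if abs(sx-x) + abs(sy-y) <= limit:
--             dict1[(x,y)] = True
--             break
--
--     for k in dict1:
--         sx, sy = k
--         # Create coordinates, that are in figure.
--         for i in range(d+1):
--             for j in range(1, d-i+1):
--                 if i == 0:
--                     if abs(sx-x) + abs(sy-y-j) <= limit: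
--                         dict2[(x,y+j)] = True
--                     if abs(sx-x) + abs(sy-y+j) <= limit:
--                         dict2[(x,y-j)] = True
--                     if abs(sx-x-j) + abs(sy-y) <= limit:
--                         dict2[(x+j,y)] = True
--                     if abs(sx-x+j) + abs(sy-y) <= limit:
--                         dict2[(x-j,y)] = True
--                 else:
--                     if abs(sx-x-j) + abs(sy-y-j) <= limit:
--                         dict2[(x+j,y+j)] = True
--                     if abs(sx-x-j) + abs(sy-y+j) <= limit:
--                         dict2[(x+j,y-j)] = True
--                     if abs(sx-x+j) + abs(sy-y-j) <= limit:
--                         dict2[(x-j,y+j)] = True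
--                     if abs(sx-x+j) + abs(sy-y+j) <= limit:
--                         dict2[(x-j,y-j)] = True
--
--     return dict2
-- ===== SOURCE B (Python) =====
-- def create_points_2(dict1, coord, d, limit):
--     """Create list of coordinates with maximum sizes d."""
--     x, y = coord
--     if any(abs(sx - x) + abs(sy - y) <= limit for sx, sy in dict1):
--         dict1[(x, y)] = True
--     offsets = []
--     for j in range(1, d + 1):
--         offsets += [(0, j), (0, -j), (j, 0), (-j, 0)]
--     for j in range(1, d):
--         offsets += [(j, j), (j, -j), (-j, j), (-j, -j)]
--     dict2 = {}
--     for sx, sy in dict1: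
--         for ox, oy in offsets:
--             if abs(sx - x - ox) + abs(sy - y - oy) <= limit:
--                 dict2[(x + ox, y + oy)] = True
--     return dict2
-- ===== Notes on version B (the rewrite author's own statement) =====
-- stated objective: faster
-- what changed: Drops A's redundant i-loop (whose i>=1 body is independent of i and only re-inserts the same keys) by precomputing the axis/diagonal offset list once and doing a single uniform conditional-insert pass per dict1 key, preserving insertion order.
import Mathlib
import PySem

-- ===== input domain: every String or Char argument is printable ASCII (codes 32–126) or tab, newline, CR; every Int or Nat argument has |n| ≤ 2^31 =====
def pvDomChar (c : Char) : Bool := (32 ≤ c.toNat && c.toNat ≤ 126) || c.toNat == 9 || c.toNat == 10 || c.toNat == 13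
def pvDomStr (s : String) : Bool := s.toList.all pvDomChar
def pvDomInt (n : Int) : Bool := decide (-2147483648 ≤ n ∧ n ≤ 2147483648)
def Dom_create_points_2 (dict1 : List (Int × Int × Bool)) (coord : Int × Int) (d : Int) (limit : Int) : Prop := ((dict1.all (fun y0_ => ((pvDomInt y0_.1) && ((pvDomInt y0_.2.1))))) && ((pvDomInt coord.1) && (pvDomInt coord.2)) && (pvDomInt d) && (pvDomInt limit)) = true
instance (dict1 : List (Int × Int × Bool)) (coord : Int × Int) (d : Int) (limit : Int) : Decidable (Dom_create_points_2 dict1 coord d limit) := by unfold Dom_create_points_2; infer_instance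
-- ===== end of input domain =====

-- B replaces A's redundant i-loop (whose i>=1 body does not depend on i) by a single offset list
-- per j, computed once, giving O(|dict1|*d) instead of O(|dict1|*d^2); same insertion order.
-- Both A and B mutate dict1 in place (they may add the key (x,y)); the equivalence proved here is
-- about the RETURN value only (B performs the same mutation).

-- ===== PORT A =====
-- Python dict assignment d[(kx,ky)] = v on a flat association list (overwrite in place, else append).
def pyDictSet (s : List (Int × Int × Bool)) (kx ky : Int) (v : Bool) : List (Int × Int × Bool) :=
  match s with
  | [] => [(kx, ky, v)]
  | (a, b, w) :: rest =>
      if a = kx ∧ b = ky then (a, b, v) :: rest else (a, b, w) :: pyDictSet rest kx ky v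

-- A's first loop: scan the keys; on the first hit insert (x,y) ↦ True into the whole dict and break.
def cp2_loop1 (x y limit : Int) (full : List (Int × Int × Bool)) :
    List (Int × Int × Bool) → List (Int × Int × Bool)
  | [] => full
  | (sx, sy, _) :: rest =>
      if |sx - x| + |sy - y| ≤ limit then pyDictSet full x y true
      else cp2_loop1 x y limit full rest

def create_points_2 (dict1 : List (Int × Int × Bool)) (coord : Int × Int) (d : Int) (limit : Int) : List (Int × Int × Bool) :=
  let x := coord.1
  let y := coord.2
  let dict1 := cp2_loop1 x y limit dict1 dict1
  dict1.foldl (fun dict2 k =>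
    let sx := k.1
    let sy := k.2.1
    (PySem.List.pyRange 0 (d+1) 1).foldl (fun dict2 i =>
      (PySem.List.pyRange 1 (d-i+1) 1).foldl (fun dict2 j =>
        if i == 0 then
          let dict2 := if |sx-x| + |sy-y-j| ≤ limit then pyDictSet dict2 x (y+j) true else dict2
          let dict2 := if |sx-x| + |sy-y+j| ≤ limit then pyDictSet dict2 x (y-j) true else dict2
          let dict2 := if |sx-x-j| + |sy-y| ≤ limit then pyDictSet dict2 (x+j) y true else dict2
          if |sx-x+j| + |sy-y| ≤ limit then pyDictSet dict2 (x-j) y true else dict2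
        else
          let dict2 := if |sx-x-j| + |sy-y-j| ≤ limit then pyDictSet dict2 (x+j) (y+j) true else dict2
          let dict2 := if |sx-x-j| + |sy-y+j| ≤ limit then pyDictSet dict2 (x+j) (y-j) true else dict2
          let dict2 := if |sx-x+j| + |sy-y-j| ≤ limit then pyDictSet dict2 (x-j) (y+j) true else dict2
          if |sx-x+j| + |sy-y+j| ≤ limit then pyDictSet dict2 (x-j) (y-j) true else dict2)
        dict2)
      dict2)
    []

-- ===== PORT B =====
def create_points_2_alt (dict1 : List (Int × Int × Bool)) (coord : Int × Int) (d : Int) (limit : Int) : List (Int × Int × Bool) :=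
  let x := coord.1
  let y := coord.2
  let dict1 := if dict1.any (fun e => decide (|e.1 - x| + |e.2.1 - y| ≤ limit)) then pyDictSet dict1 x y true else dict1
  let offsets := (PySem.List.pyRange 1 (d+1) 1).foldl (fun acc j => acc ++ [((0:Int), j), (0, -j), (j, 0), (-j, 0)]) ([] : List (Int × Int))
  let offsets := (PySem.List.pyRange 1 d 1).foldl (fun acc j => acc ++ [(j, j), (j, -j), (-j, j), (-j, -j)]) offsets
  dict1.foldl (fun dict2 k =>
    offsets.foldl (fun dict2 o =>
      if |k.1 - x - o.1| + |k.2.1 - y - o.2| ≤ limit then pyDictSet dict2 (x + o.1) (y + o.2) true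
      else dict2)
      dict2)
    []

-- ===== PRECONDITION & SPEC =====
def Spec_create_points_2 (dict1 : List (Int × Int × Bool)) (coord : Int × Int) (d : Int) (limit : Int) (out : List (Int × Int × Bool)) : Prop := out = create_points_2_alt dict1 coord d limit
instance (dict1 : List (Int × Int × Bool)) (coord : Int × Int) (d : Int) (limit : Int) (out : List (Int × Int × Bool)) : Decidable (Spec_create_points_2 dict1 coord d limit out) := by unfold Spec_create_points_2; infer_instance

-- ===== CLAIM (what is proved, stated in full; the proofs are below) =====
def Claim_equal_create_points_2 : Prop := ∀ (dict1 : List (Int × Int × Bool)) (coord : Int × Int) (d : Int) (limit : Int), Dom_create_points_2 dict1 coord d limit → Spec_create_points_2 dict1 coord d limit (create_points_2 dict1 coord d limit)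

-- ===== LEMMAS AND PROOFS =====

-- lookup in the flat association list
def dget : List (Int × Int × Bool) → Int → Int → Option Bool
  | [], _, _ => none
  | (a, b, w) :: rest, kx, ky => if a = kx ∧ b = ky then some w else dget rest kx ky

-- one conditional insert of B's uniform shape, for a fixed key (sx,sy) of dict1
def bstep (x y sx sy limit : Int) (s : List (Int × Int × Bool)) (o : Int × Int) : List (Int × Int × Bool) :=
  if |sx - x - o.1| + |sy - y - o.2| ≤ limit then pyDictSet s (x + o.1) (y + o.2) true else s

def astep (x y sx sy limit j : Int) (s : List (Int × Int × Bool)) : List (Int × Int × Bool) :=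
  ([((0:Int), j), (0, -j), (j, 0), (-j, 0)]).foldl (bstep x y sx sy limit) s

def dstep (x y sx sy limit j : Int) (s : List (Int × Int × Bool)) : List (Int × Int × Bool) :=
  ([(j, j), (j, -j), (-j, j), (-j, -j)]).foldl (bstep x y sx sy limit) s

def arun (x y sx sy limit d : Int) (s : List (Int × Int × Bool)) : List (Int × Int × Bool) :=
  (PySem.List.pyRange 1 (d+1) 1).foldl (fun s j => astep x y sx sy limit j s) s

def drun (x y sx sy limit n : Int) (s : List (Int × Int × Bool)) : List (Int × Int × Bool) :=
  (PySem.List.pyRange 1 n 1).foldl (fun s j => dstep x y sx sy limit j s) s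

-- all four diagonal keys of a given j are already recorded as true (where their condition holds)
def dprop (x y sx sy limit j : Int) (s : List (Int × Int × Bool)) : Prop :=
  ∀ o ∈ ([(j, j), (j, -j), (-j, j), (-j, -j)] : List (Int × Int)),
    |sx - x - o.1| + |sy - y - o.2| ≤ limit → dget s (x + o.1) (y + o.2) = some true

theorem dget_set_self (s : List (Int × Int × Bool)) (kx ky : Int) (v : Bool) :
    dget (pyDictSet s kx ky v) kx ky = some v := by
  induction s with
  | nil => simp [pyDictSet, dget]
  | cons h t ih =>
    obtain ⟨a, b, w⟩ := h
    by_cases hk : a = kx ∧ b = ky <;> simp [pyDictSet, dget, hk, ih]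

theorem set_eq_of_dget (s : List (Int × Int × Bool)) (kx ky : Int) (v : Bool)
    (h : dget s kx ky = some v) : pyDictSet s kx ky v = s := by
  induction s with
  | nil => simp [dget] at h
  | cons hd t ih =>
    obtain ⟨a, b, w⟩ := hd
    by_cases hk : a = kx ∧ b = ky
    · simp [dget, hk] at h
      simp [pyDictSet, hk, h]
    · simp [dget, hk] at h
      simp [pyDictSet, hk, ih h]

theorem dget_set_mono (s : List (Int × Int × Bool)) (kx ky a b : Int)
    (h : dget s a b = some true) : dget (pyDictSet s kx ky true) a b = some true := by
  by_cases hk : kx = a ∧ ky = b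
  · obtain ⟨h1, h2⟩ := hk; subst h1; subst h2; exact dget_set_self s kx ky true
  · induction s with
    | nil => simp [dget] at h
    | cons hd t ih =>
      obtain ⟨p, q, w⟩ := hd
      by_cases hp : p = kx ∧ q = ky
      · obtain ⟨e1, e2⟩ := hp; subst e1; subst e2
        have hne : ¬(p = a ∧ q = b) := by tauto
        simp [dget, hne] at h
        simp [pyDictSet, dget, hne, h]
      · simp [pyDictSet, hp]
        by_cases hq : p = a ∧ q = b
        · simp [dget, hq] at h ⊢; exact h
        · simp [dget, hq] at h ⊢; exact ih h

theorem bstep_mono (x y sx sy limit : Int) (o : Int × Int) (s : List (Int × Int × Bool)) (a b : Int)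
    (h : dget s a b = some true) : dget (bstep x y sx sy limit s o) a b = some true := by
  unfold bstep; split
  · exact dget_set_mono s _ _ a b h
  · exact h

theorem foldl_bstep_mono (x y sx sy limit : Int) (L : List (Int × Int)) (s : List (Int × Int × Bool))
    (a b : Int) (h : dget s a b = some true) :
    dget (L.foldl (bstep x y sx sy limit) s) a b = some true := by
  induction L generalizing s with
  | nil => exact h
  | cons o t ih => exact ih _ (bstep_mono x y sx sy limit o s a b h)

theorem dstep_mono (x y sx sy limit j : Int) (s : List (Int × Int × Bool)) (a b : Int)
    (h : dget s a b = some true) : dget (dstep x y sx sy limit j s) a b = some true :=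
  foldl_bstep_mono x y sx sy limit _ s a b h

theorem foldl_dstep_mono (x y sx sy limit : Int) (L : List Int) (s : List (Int × Int × Bool))
    (a b : Int) (h : dget s a b = some true) :
    dget (L.foldl (fun s j => dstep x y sx sy limit j s) s) a b = some true := by
  induction L generalizing s with
  | nil => exact h
  | cons c t ih => exact ih _ (dstep_mono x y sx sy limit c s a b h)

theorem bstep_sets (x y sx sy limit : Int) (o : Int × Int) (s : List (Int × Int × Bool))
    (hc : |sx - x - o.1| + |sy - y - o.2| ≤ limit) :
    dget (bstep x y sx sy limit s o) (x + o.1) (y + o.2) = some true := by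
  unfold bstep; rw [if_pos hc]; exact dget_set_self ..

theorem dstep_dprop (x y sx sy limit j : Int) (s : List (Int × Int × Bool)) :
    dprop x y sx sy limit j (dstep x y sx sy limit j s) := by
  intro o ho hc
  simp only [List.mem_cons, List.not_mem_nil, or_false] at ho
  rcases ho with h | h | h | h <;> subst h <;>
    simp only [dstep, List.foldl_cons, List.foldl_nil] <;>
    (repeat' first
      | exact bstep_sets _ _ _ _ _ _ _ hc
      | apply bstep_mono)

theorem bstep_id (x y sx sy limit : Int) (o : Int × Int) (s : List (Int × Int × Bool))
    (h : |sx - x - o.1| + |sy - y - o.2| ≤ limit → dget s (x + o.1) (y + o.2) = some true) :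
    bstep x y sx sy limit s o = s := by
  unfold bstep; split
  · next hc => exact set_eq_of_dget s _ _ true (h hc)
  · rfl

theorem dstep_id (x y sx sy limit j : Int) (s : List (Int × Int × Bool))
    (h : dprop x y sx sy limit j s) : dstep x y sx sy limit j s = s := by
  unfold dprop at h
  simp only [dstep, List.foldl_cons, List.foldl_nil]
  rw [bstep_id x y sx sy limit _ s (h _ (by simp)),
      bstep_id x y sx sy limit _ s (h _ (by simp)),
      bstep_id x y sx sy limit _ s (h _ (by simp)),
      bstep_id x y sx sy limit _ s (h _ (by simp))]

theorem dprop_foldl_dstep (x y sx sy limit j : Int) (L : List Int) (s : List (Int × Int × Bool))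
    (hp : dprop x y sx sy limit j s) :
    dprop x y sx sy limit j (L.foldl (fun s j => dstep x y sx sy limit j s) s) :=
  fun o ho hc => foldl_dstep_mono x y sx sy limit L s _ _ (hp o ho hc)

theorem foldl_dstep_dprop (x y sx sy limit : Int) (L : List Int) (s : List (Int × Int × Bool))
    (j : Int) (hj : j ∈ L) :
    dprop x y sx sy limit j (L.foldl (fun s j => dstep x y sx sy limit j s) s) := by
  induction L generalizing s with
  | nil => cases hj
  | cons c t ih =>
    simp only [List.foldl_cons]
    rcases List.mem_cons.mp hj with h | h
    · subst h
      exact dprop_foldl_dstep x y sx sy limit j t _ (dstep_dprop x y sx sy limit j s)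
    · exact ih _ h

theorem foldl_dstep_id (x y sx sy limit : Int) (L : List Int) (s : List (Int × Int × Bool))
    (h : ∀ j ∈ L, dprop x y sx sy limit j s) :
    L.foldl (fun s j => dstep x y sx sy limit j s) s = s := by
  induction L with
  | nil => rfl
  | cons a t ih =>
    simp only [List.foldl_cons]
    rw [dstep_id x y sx sy limit a s (h a (by simp))]
    exact ih (fun j hj => h j (List.mem_cons_of_mem _ hj))

theorem drun_drun (x y sx sy limit m n : Int) (hmn : m ≤ n) (s : List (Int × Int × Bool)) :
    drun x y sx sy limit m (drun x y sx sy limit n s) = drun x y sx sy limit n s := by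
  unfold drun
  apply foldl_dstep_id
  intro j hj
  apply foldl_dstep_dprop
  rw [PySem.List.mem_pyRange_one] at hj ⊢
  omega

theorem druns_fix (x y sx sy limit d : Int) (s0 : List (Int × Int × Bool)) (L : List Int)
    (h : ∀ i ∈ L, 1 ≤ i) :
    L.foldl (fun s i => drun x y sx sy limit (d - i + 1) s) (drun x y sx sy limit d s0) =
      drun x y sx sy limit d s0 := by
  induction L with
  | nil => rfl
  | cons a t ih =>
    simp only [List.foldl_cons]
    rw [drun_drun x y sx sy limit (d - a + 1) d (by have := h a (by simp); omega) s0]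
    exact ih (fun i hi => h i (by simp [hi]))

theorem druns_fold (x y sx sy limit d : Int) (s0 : List (Int × Int × Bool)) (hd : 0 ≤ d) :
    (PySem.List.pyRange 1 (d+1) 1).foldl (fun s i => drun x y sx sy limit (d - i + 1) s) s0 =
      drun x y sx sy limit d s0 := by
  by_cases h1 : d = 0
  · subst h1
    rw [PySem.List.pyRange_one_eq_nil (by omega)]
    unfold drun
    rw [PySem.List.pyRange_one_eq_nil (by omega)]
    rfl
  · rw [PySem.List.pyRange_one_cons (show (1:Int) < d + 1 by omega), List.foldl_cons]
    rw [show d - 1 + 1 = d from by ring]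
    apply druns_fix
    intro i hi
    rw [PySem.List.mem_pyRange_one] at hi
    omega

theorem ablam (x y sx sy limit : Int) :
    (fun (dict2 : List (Int × Int × Bool)) (j : Int) =>
        if (0:Int) == 0 then
          let dict2 := if |sx-x| + |sy-y-j| ≤ limit then pyDictSet dict2 x (y+j) true else dict2
          let dict2 := if |sx-x| + |sy-y+j| ≤ limit then pyDictSet dict2 x (y-j) true else dict2
          let dict2 := if |sx-x-j| + |sy-y| ≤ limit then pyDictSet dict2 (x+j) y true else dict2
          if |sx-x+j| + |sy-y| ≤ limit then pyDictSet dict2 (x-j) y true else dict2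
        else
          let dict2 := if |sx-x-j| + |sy-y-j| ≤ limit then pyDictSet dict2 (x+j) (y+j) true else dict2
          let dict2 := if |sx-x-j| + |sy-y+j| ≤ limit then pyDictSet dict2 (x+j) (y-j) true else dict2
          let dict2 := if |sx-x+j| + |sy-y-j| ≤ limit then pyDictSet dict2 (x-j) (y+j) true else dict2
          if |sx-x+j| + |sy-y+j| ≤ limit then pyDictSet dict2 (x-j) (y-j) true else dict2)
      = fun s j => astep x y sx sy limit j s := by
  funext s j
  simp only [beq_self_eq_true, if_true, astep, bstep, List.foldl_cons, List.foldl_nil,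
    sub_zero, add_zero, sub_neg_eq_add, ← sub_eq_add_neg]

theorem dblam (x y sx sy limit i : Int) (hi : ¬ i = 0) :
    (fun (dict2 : List (Int × Int × Bool)) (j : Int) =>
        if i == 0 then
          let dict2 := if |sx-x| + |sy-y-j| ≤ limit then pyDictSet dict2 x (y+j) true else dict2
          let dict2 := if |sx-x| + |sy-y+j| ≤ limit then pyDictSet dict2 x (y-j) true else dict2
          let dict2 := if |sx-x-j| + |sy-y| ≤ limit then pyDictSet dict2 (x+j) y true else dict2
          if |sx-x+j| + |sy-y| ≤ limit then pyDictSet dict2 (x-j) y true else dict2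
        else
          let dict2 := if |sx-x-j| + |sy-y-j| ≤ limit then pyDictSet dict2 (x+j) (y+j) true else dict2
          let dict2 := if |sx-x-j| + |sy-y+j| ≤ limit then pyDictSet dict2 (x+j) (y-j) true else dict2
          let dict2 := if |sx-x+j| + |sy-y-j| ≤ limit then pyDictSet dict2 (x-j) (y+j) true else dict2
          if |sx-x+j| + |sy-y+j| ≤ limit then pyDictSet dict2 (x-j) (y-j) true else dict2)
      = fun s j => dstep x y sx sy limit j s := by
  funext s j
  simp only [beq_iff_eq, hi, if_false, dstep, bstep, List.foldl_cons, List.foldl_nil,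
    sub_neg_eq_add, ← sub_eq_add_neg]

-- the i ≥ 1 passes of A's i-loop are one full diagonal pass followed by no-ops
theorem atail (x y sx sy limit d : Int) (s0 : List (Int × Int × Bool)) (hd : 0 ≤ d)
    (F : List (Int × Int × Bool) → Int → List (Int × Int × Bool))
    (hF : ∀ (acc : List (Int × Int × Bool)) (i : Int), 1 ≤ i → i < d + 1 →
      F acc i = drun x y sx sy limit (d - i + 1) acc) :
    (PySem.List.pyRange 1 (d+1) 1).foldl F s0 = drun x y sx sy limit d s0 := by
  rw [PySem.List.foldl_congr_mem _ F (fun acc i => drun x y sx sy limit (d-i+1) acc) s0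
      (by intro acc i hi; rw [PySem.List.mem_pyRange_one] at hi; exact hF acc i hi.1 hi.2)]
  exact druns_fold x y sx sy limit d s0 hd

-- A's per-key double loop computes one axis pass then one diagonal pass (the i ≥ 2 passes are no-ops)
theorem akey (x y sx sy limit d : Int) (s : List (Int × Int × Bool)) :
    (PySem.List.pyRange 0 (d+1) 1).foldl (fun dict2 i =>
      (PySem.List.pyRange 1 (d-i+1) 1).foldl (fun dict2 j =>
        if i == 0 then
          let dict2 := if |sx-x| + |sy-y-j| ≤ limit then pyDictSet dict2 x (y+j) true else dict2
          let dict2 := if |sx-x| + |sy-y+j| ≤ limit then pyDictSet dict2 x (y-j) true else dict2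
          let dict2 := if |sx-x-j| + |sy-y| ≤ limit then pyDictSet dict2 (x+j) y true else dict2
          if |sx-x+j| + |sy-y| ≤ limit then pyDictSet dict2 (x-j) y true else dict2
        else
          let dict2 := if |sx-x-j| + |sy-y-j| ≤ limit then pyDictSet dict2 (x+j) (y+j) true else dict2
          let dict2 := if |sx-x-j| + |sy-y+j| ≤ limit then pyDictSet dict2 (x+j) (y-j) true else dict2
          let dict2 := if |sx-x+j| + |sy-y-j| ≤ limit then pyDictSet dict2 (x-j) (y+j) true else dict2
          if |sx-x+j| + |sy-y+j| ≤ limit then pyDictSet dict2 (x-j) (y-j) true else dict2)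
        dict2) s
      = drun x y sx sy limit d (arun x y sx sy limit d s) := by
  by_cases hd : d + 1 ≤ 0
  · rw [PySem.List.pyRange_one_eq_nil hd]
    unfold arun drun
    rw [PySem.List.pyRange_one_eq_nil (by omega), PySem.List.pyRange_one_eq_nil (by omega)]
    rfl
  · rw [PySem.List.pyRange_one_cons (show (0:Int) < d + 1 by omega), List.foldl_cons]
    refine Eq.trans (atail x y sx sy limit d _ (by omega) _ ?_) ?_
    · intro acc i h1 h2
      show (PySem.List.pyRange 1 (d-i+1) 1).foldl (fun dict2 j =>
          if i == 0 then
            let dict2 := if |sx-x| + |sy-y-j| ≤ limit then pyDictSet dict2 x (y+j) true else dict2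
            let dict2 := if |sx-x| + |sy-y+j| ≤ limit then pyDictSet dict2 x (y-j) true else dict2
            let dict2 := if |sx-x-j| + |sy-y| ≤ limit then pyDictSet dict2 (x+j) y true else dict2
            if |sx-x+j| + |sy-y| ≤ limit then pyDictSet dict2 (x-j) y true else dict2
          else
            let dict2 := if |sx-x-j| + |sy-y-j| ≤ limit then pyDictSet dict2 (x+j) (y+j) true else dict2
            let dict2 := if |sx-x-j| + |sy-y+j| ≤ limit then pyDictSet dict2 (x+j) (y-j) true else dict2
            let dict2 := if |sx-x+j| + |sy-y-j| ≤ limit then pyDictSet dict2 (x-j) (y+j) true else dict2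
            if |sx-x+j| + |sy-y+j| ≤ limit then pyDictSet dict2 (x-j) (y-j) true else dict2)
          acc = drun x y sx sy limit (d-i+1) acc
      rw [dblam x y sx sy limit i (by omega)]
      rfl
    · congr 1
      show (PySem.List.pyRange 1 (d-0+1) 1).foldl (fun dict2 j =>
        if (0:Int) == 0 then
          let dict2 := if |sx-x| + |sy-y-j| ≤ limit then pyDictSet dict2 x (y+j) true else dict2
          let dict2 := if |sx-x| + |sy-y+j| ≤ limit then pyDictSet dict2 x (y-j) true else dict2
          let dict2 := if |sx-x-j| + |sy-y| ≤ limit then pyDictSet dict2 (x+j) y true else dict2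
          if |sx-x+j| + |sy-y| ≤ limit then pyDictSet dict2 (x-j) y true else dict2
        else
          let dict2 := if |sx-x-j| + |sy-y-j| ≤ limit then pyDictSet dict2 (x+j) (y+j) true else dict2
          let dict2 := if |sx-x-j| + |sy-y+j| ≤ limit then pyDictSet dict2 (x+j) (y-j) true else dict2
          let dict2 := if |sx-x+j| + |sy-y-j| ≤ limit then pyDictSet dict2 (x-j) (y+j) true else dict2
          if |sx-x+j| + |sy-y+j| ≤ limit then pyDictSet dict2 (x-j) (y-j) true else dict2)
        s = arun x y sx sy limit d s
      rw [show d - 0 + 1 = d + 1 from by ring, ablam x y sx sy limit]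
      rfl

-- B's per-key pass over the precomputed offset list is the same axis pass then diagonal pass
theorem bkey (x y sx sy limit d : Int) (s : List (Int × Int × Bool)) :
    ((PySem.List.pyRange 1 d 1).foldl (fun acc j => acc ++ [(j, j), (j, -j), (-j, j), (-j, -j)])
        ((PySem.List.pyRange 1 (d+1) 1).foldl
          (fun acc j => acc ++ [((0:Int), j), (0, -j), (j, 0), (-j, 0)]) [])).foldl
      (bstep x y sx sy limit) s
      = drun x y sx sy limit d (arun x y sx sy limit d s) := by
  rw [PySem.List.foldl_append_eq_flatMap, PySem.List.foldl_append_eq_flatMap, List.nil_append,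
    List.foldl_append, List.foldl_flatMap, List.foldl_flatMap]
  rfl

theorem loop1_eq (x y limit : Int) (full L : List (Int × Int × Bool)) :
    cp2_loop1 x y limit full L =
      if L.any (fun e => decide (|e.1 - x| + |e.2.1 - y| ≤ limit)) then pyDictSet full x y true
      else full := by
  induction L with
  | nil => simp [cp2_loop1]
  | cons e t ih =>
    obtain ⟨sx, sy, w⟩ := e
    by_cases h : |sx - x| + |sy - y| ≤ limit
    · simp [cp2_loop1, h]
    · simp only [cp2_loop1, if_neg h, List.any_cons]
      have hcond : (decide (|sx - x| + |sy - y| ≤ limit) ||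
          t.any fun e => decide (|e.1 - x| + |e.2.1 - y| ≤ limit)) =
          (t.any fun e => decide (|e.1 - x| + |e.2.1 - y| ≤ limit)) := by simp [h]
      rw [ih]
      simp only [hcond]

-- ===== VERDICT (by name: the statement is the Claim_ definition above) =====
theorem create_points_2_spec : Claim_equal_create_points_2 := by
  intro dict1 coord d limit _
  obtain ⟨x, y⟩ := coord
  unfold Spec_create_points_2
  simp only [create_points_2, create_points_2_alt]
  rw [loop1_eq]
  apply PySem.List.foldl_congr_mem
  intro acc k _
  exact (akey x y k.1 k.2.1 limit d acc).trans (bkey x y k.1 k.2.1 limit d acc).symm
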